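-- pv_equiv track=rewrite | github.com/ansible-collections/cisco.ios | generate_molecule_from_recording.py | generate_scenario_entry
-- ===== SOURCE A (Python) =====
-- def module_to_scenario_id(module_name, state):
--     """ios_hostname, merged -> ios-hostname-merged"""
--     return "%s-%s" % (module_name.replace("_", "-"), state)
--
-- def generate_scenario_entry(module_name, state_name, show_cmd, phase):
--     """Generate a single scenario entry for the transcript map."""
--     scenario_id = module_to_scenario_id(module_name, state_name)
--     lines = []
--     lines.append("  %s:" % scenario_id)
--     lines.append("    platform: %s" % module_name)
--     lines.append("    sequence:")
--     lines.append('      - command: "%s"' % show_cmd)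
--     lines.append(
--         '        transcript: "transcripts/%s/scenarios/%s/before.txt"' % (module_name, state_name),
--     )
--     lines.append('      - command: "configure terminal"')
--     lines.append('        transcript: "transcripts/generic_empty_return.txt"')
--
--     for cmd in phase["commands"]:
--         escaped = cmd.replace('"', '\\"')
--         lines.append('      - command: "%s"' % escaped)
--         lines.append('        transcript: "transcripts/generic_empty_return.txt"')
--
--     lines.append('      - command: "end"')
--     lines.append('        transcript: "transcripts/generic_empty_return.txt"')
--     lines.append('      - command: "%s"' % show_cmd)
--     lines.append(
--         '        transcript: "transcripts/%s/scenarios/%s/after.txt"' % (module_name, state_name),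
--     )
--     lines.append('      - command: "%s"' % show_cmd)
--     lines.append(
--         '        transcript: "transcripts/%s/scenarios/%s/after.txt"' % (module_name, state_name),
--     )
--
--     return "\n".join(lines)
-- ===== SOURCE B (Python) =====
-- def generate_scenario_entry(module_name, state_name, show_cmd, phase):
--     """Table-driven: build a (command, transcript) sequence once, then render it uniformly."""
--     generic = "transcripts/generic_empty_return.txt"
--     before = "transcripts/%s/scenarios/%s/before.txt" % (module_name, state_name)
--     after = "transcripts/%s/scenarios/%s/after.txt" % (module_name, state_name)
--     seq = (
--         [(show_cmd, before), ("configure terminal", generic)]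
--         + [(c.replace('"', '\\"'), generic) for c in phase["commands"]]
--         + [("end", generic), (show_cmd, after), (show_cmd, after)]
--     )
--     header = [
--         "  %s-%s:" % (module_name.replace("_", "-"), state_name),
--         "    platform: %s" % module_name,
--         "    sequence:",
--     ]
--     rows = [
--         line
--         for cmd, txt in seq
--         for line in ('      - command: "%s"' % cmd, '        transcript: "%s"' % txt)
--     ]
--     return "\n".join(header + rows)
-- ===== Notes on version B (the rewrite author's own statement) =====
-- stated objective: simpler
-- what changed: Instead of appending hard-coded YAML lines step by step with a loop in the middle, B builds one (command, transcript) table covering the whole sequence and renders every entry with a single uniform two-line formatter.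
import Mathlib
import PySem

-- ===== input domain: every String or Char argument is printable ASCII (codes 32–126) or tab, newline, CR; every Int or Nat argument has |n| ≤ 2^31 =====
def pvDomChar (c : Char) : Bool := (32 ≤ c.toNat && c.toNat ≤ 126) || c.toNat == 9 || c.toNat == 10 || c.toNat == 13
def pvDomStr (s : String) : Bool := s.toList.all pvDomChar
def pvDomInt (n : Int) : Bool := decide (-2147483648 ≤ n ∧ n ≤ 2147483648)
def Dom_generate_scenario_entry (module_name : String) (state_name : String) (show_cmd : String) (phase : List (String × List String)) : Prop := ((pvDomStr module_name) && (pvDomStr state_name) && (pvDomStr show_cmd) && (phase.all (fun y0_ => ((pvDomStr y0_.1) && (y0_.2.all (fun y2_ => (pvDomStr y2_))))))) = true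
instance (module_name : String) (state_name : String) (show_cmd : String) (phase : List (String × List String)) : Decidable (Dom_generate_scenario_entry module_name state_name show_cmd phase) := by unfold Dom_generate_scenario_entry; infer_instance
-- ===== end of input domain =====

-- B replaces A's step-by-step line appends (with the loop in the middle) by one
-- (command, transcript) table rendered with a uniform two-line formatter; same output, simpler shape.

-- ===== PORT A =====
def module_to_scenario_id (module_name : String) (state : String) : String :=
  PySem.Str.replace module_name "_" "-" ++ "-" ++ state

def generate_scenario_entry (module_name : String) (state_name : String) (show_cmd : String) (phase : List (String × List String)) : String :=
  -- phase["commands"]: dict lookup, first match; Python raises KeyError when absent (excluded by Pre_)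
  match List.lookup "commands" phase with
  | none => ""
  | some cmds =>
    let scenario_id := module_to_scenario_id module_name state_name
    let lines : List String :=
      [ "  " ++ scenario_id ++ ":",
        "    platform: " ++ module_name,
        "    sequence:",
        "      - command: \"" ++ show_cmd ++ "\"",
        "        transcript: \"transcripts/" ++ module_name ++ "/scenarios/" ++ state_name ++ "/before.txt\"",
        "      - command: \"configure terminal\"",
        "        transcript: \"transcripts/generic_empty_return.txt\"" ]
    let lines := cmds.foldl (fun lines cmd =>
      lines ++ [ "      - command: \"" ++ PySem.Str.replace cmd "\"" "\\\"" ++ "\"",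
                 "        transcript: \"transcripts/generic_empty_return.txt\"" ]) lines
    let lines := lines ++
      [ "      - command: \"end\"",
        "        transcript: \"transcripts/generic_empty_return.txt\"",
        "      - command: \"" ++ show_cmd ++ "\"",
        "        transcript: \"transcripts/" ++ module_name ++ "/scenarios/" ++ state_name ++ "/after.txt\"",
        "      - command: \"" ++ show_cmd ++ "\"",
        "        transcript: \"transcripts/" ++ module_name ++ "/scenarios/" ++ state_name ++ "/after.txt\"" ]
    PySem.Str.join "\n" lines

-- ===== PORT B =====
def generate_scenario_entry_alt (module_name : String) (state_name : String) (show_cmd : String) (phase : List (String × List String)) : String :=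
  match List.lookup "commands" phase with
  | none => ""
  | some cmds =>
    let generic := "transcripts/generic_empty_return.txt"
    let before := "transcripts/" ++ module_name ++ "/scenarios/" ++ state_name ++ "/before.txt"
    let after := "transcripts/" ++ module_name ++ "/scenarios/" ++ state_name ++ "/after.txt"
    let seq : List (String × String) :=
      [(show_cmd, before), ("configure terminal", generic)]
      ++ cmds.map (fun c => (PySem.Str.replace c "\"" "\\\"", generic))
      ++ [("end", generic), (show_cmd, after), (show_cmd, after)]
    let header : List String :=
      [ "  " ++ PySem.Str.replace module_name "_" "-" ++ "-" ++ state_name ++ ":",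
        "    platform: " ++ module_name,
        "    sequence:" ]
    let rows : List String := seq.flatMap (fun p =>
      [ "      - command: \"" ++ p.1 ++ "\"",
        "        transcript: \"" ++ p.2 ++ "\"" ])
    PySem.Str.join "\n" (header ++ rows)

-- ===== PRECONDITION & SPEC =====
-- Pre_ excludes exactly the inputs where Python A raises KeyError: no "commands" key in phase.
def Pre_generate_scenario_entry (module_name : String) (state_name : String) (show_cmd : String) (phase : List (String × List String)) : Prop :=
  (List.lookup "commands" phase).isSome = true
instance (module_name : String) (state_name : String) (show_cmd : String) (phase : List (String × List String)) : Decidable (Pre_generate_scenario_entry module_name state_name show_cmd phase) := by unfold Pre_generate_scenario_entry; infer_instance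

def pvWitness_generate_scenario_entry : String × String × String × (List (String × List String)) :=
  ("ios_hostname", "merged", "show running-config", [("commands", ["hostname \"R1\""])])

def Spec_generate_scenario_entry (module_name : String) (state_name : String) (show_cmd : String) (phase : List (String × List String)) (out : String) : Prop := out = generate_scenario_entry_alt module_name state_name show_cmd phase
instance (module_name : String) (state_name : String) (show_cmd : String) (phase : List (String × List String)) (out : String) : Decidable (Spec_generate_scenario_entry module_name state_name show_cmd phase out) := by unfold Spec_generate_scenario_entry; infer_instance

-- ===== CLAIM (what is proved, stated in full; the proofs are below) =====
def Claim_equal_generate_scenario_entry : Prop := ∀ (module_name : String) (state_name : String) (show_cmd : String) (phase : List (String × List String)), Dom_generate_scenario_entry module_name state_name show_cmd phase → Pre_generate_scenario_entry module_name state_name show_cmd phase → Spec_generate_scenario_entry module_name state_name show_cmd phase (generate_scenario_entry module_name state_name show_cmd phase)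

-- ===== LEMMAS AND PROOFS =====

theorem pv_witness_ok :
    Dom_generate_scenario_entry (pvWitness_generate_scenario_entry.1) (pvWitness_generate_scenario_entry.2.1) (pvWitness_generate_scenario_entry.2.2.1) (pvWitness_generate_scenario_entry.2.2.2) ∧
    Pre_generate_scenario_entry (pvWitness_generate_scenario_entry.1) (pvWitness_generate_scenario_entry.2.1) (pvWitness_generate_scenario_entry.2.2.1) (pvWitness_generate_scenario_entry.2.2.2) := by
  decide

-- A's for-loop over commands, as a flatMap
theorem pv_foldl_two_lines (cmds : List String) (f g : String → String) (init : List String) :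
    cmds.foldl (fun acc c => acc ++ [f c, g c]) init = init ++ cmds.flatMap (fun c => [f c, g c]) := by
  induction cmds generalizing init with
  | nil => simp
  | cons c cs ih => simp [ih, List.append_assoc]

-- A writes the transcript path inside one literal; B concatenates a quote around the stored path
theorem pv_lit_merge (x : String) :
    "        transcript: \"" ++ ("transcripts/" ++ x) = "        transcript: \"transcripts/" ++ x := by
  rw [← String.append_assoc]
  exact rfl

theorem generate_scenario_entry_eq_alt (module_name state_name show_cmd : String) (phase : List (String × List String)) :
    generate_scenario_entry module_name state_name show_cmd phase
      = generate_scenario_entry_alt module_name state_name show_cmd phase := by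
  unfold generate_scenario_entry generate_scenario_entry_alt module_to_scenario_id
  cases h : List.lookup "commands" phase with
  | none => rfl
  | some cmds =>
    simp only []
    congr 1
    rw [pv_foldl_two_lines]
    simp only [List.flatMap_append, List.flatMap_cons, List.flatMap_nil, List.flatMap_map,
      List.append_nil, List.cons_append, List.nil_append]
    simp [String.append_assoc, pv_lit_merge]

-- ===== VERDICT (by name: the statement is the Claim_ definition above) =====
theorem generate_scenario_entry_spec : Claim_equal_generate_scenario_entry := by
  intro module_name state_name show_cmd phase _ _
  unfold Spec_generate_scenario_entry
  exact generate_scenario_entry_eq_alt module_name state_name show_cmd phase
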